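-- pv_equiv track=rewrite | github.com/kanzure/PySplicer | pysplicer.py | nucleic_iupac_purify
-- ===== SOURCE A (Python) =====
-- def nucleic_iupac_purify(iupac_sequence, strip_flanking_wildcards=False):
--     '''Prunes only legal IUPAC DNA/RNA characters from a given string and
--     returns those.'''
--     assert isinstance(iupac_sequence, str)
--     iupac_sequence = iupac_sequence.upper()
--     iupac_characters = ['A', 'T', 'C', 'G', 'U',    # Canonical bases
--                         'B', 'V', 'D', 'H',         # B=Not A, V=Not T, D=Not C, H=Not G
--                         'S', 'W',                   # Strong and Weak: GC vs. AT
--                         'K', 'M',                   # "Keto" and "aMino": GT vs. AC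
--                         'R', 'Y',                   # "puRine" and "pYrimidine": AG vs CT
--                         'N', '.', '-']              # Wildcards: any N.
--     output_char_list = []
--     for char in iupac_sequence:
--         if char in iupac_characters:
--             output_char_list.append(char)
--     output_sequence = ''.join(output_char_list)
--     if strip_flanking_wildcards:
--         # Having "NNNN" before or after a sequence is not only useless,
--         # it can cause downstream hiccups where the program may generate huge sets
--         # of redundant permutations, or unnecessarily large regular expressions.
--         for char in ["N", "-", "."]:
--             output_sequence = output_sequence.replace(char, '')
--     return output_sequence
-- ===== SOURCE B (Python) =====
-- def nucleic_iupac_purify(iupac_sequence, strip_flanking_wildcards=False):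
--     '''Prunes only legal IUPAC DNA/RNA characters from a given string and
--     returns those.'''
--     assert isinstance(iupac_sequence, str)
--     allowed = set('ATCGUBVDHSWKMRYN.-')
--     if strip_flanking_wildcards:
--         allowed -= {'N', '-', '.'}
--     return ''.join(c for c in iupac_sequence.upper() if c in allowed)
-- ===== Notes on version B (the rewrite author's own statement) =====
-- stated objective: simpler
-- what changed: Replaced A's two-stage pipeline (filter into a list against an 18-element membership list, join, then a replace-pass per wildcard) by one pass whose O(1) set membership already excludes the wildcards when stripping.
import Mathlib
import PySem

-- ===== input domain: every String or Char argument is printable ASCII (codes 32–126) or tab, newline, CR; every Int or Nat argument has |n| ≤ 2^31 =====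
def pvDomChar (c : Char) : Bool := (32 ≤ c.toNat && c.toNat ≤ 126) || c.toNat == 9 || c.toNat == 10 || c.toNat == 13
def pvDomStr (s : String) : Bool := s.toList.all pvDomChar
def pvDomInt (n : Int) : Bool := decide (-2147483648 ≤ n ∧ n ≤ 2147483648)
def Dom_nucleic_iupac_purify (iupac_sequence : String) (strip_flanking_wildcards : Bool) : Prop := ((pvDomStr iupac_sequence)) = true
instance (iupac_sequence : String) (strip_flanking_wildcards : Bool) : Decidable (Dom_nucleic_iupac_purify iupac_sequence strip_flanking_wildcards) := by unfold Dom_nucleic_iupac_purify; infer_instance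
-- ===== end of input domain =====

-- B folds A's second stage (replace-removal of the wildcards) into the allowed-set of a single
-- filtering pass over the upper-cased input; objective: simpler (one pass, same O(n) cost).

-- ===== PORT A =====
def nucleic_iupac_purify (iupac_sequence : String) (strip_flanking_wildcards : Bool) : String :=
  let s := PySem.Str.upper iupac_sequence
  let iupac_characters : List Char :=
    ['A', 'T', 'C', 'G', 'U', 'B', 'V', 'D', 'H', 'S', 'W', 'K', 'M', 'R', 'Y', 'N', '.', '-']
  let output_char_list : List Char :=
    s.toList.foldl (fun acc char => if char ∈ iupac_characters then acc ++ [char] else acc) []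
  -- ''.join of a list of single characters = String.ofList (exact)
  let output_sequence := String.ofList output_char_list
  if strip_flanking_wildcards then
    ['N', '-', '.'].foldl
      (fun out char => PySem.Str.replace out (String.ofList [char]) "") output_sequence
  else output_sequence

-- ===== PORT B =====
def nucleic_iupac_purify_alt (iupac_sequence : String) (strip_flanking_wildcards : Bool) : String :=
  let allowed : PySem.Set Char := PySem.Set.ofList "ATCGUBVDHSWKMRYN.-".toList
  let allowed : PySem.Set Char :=
    if strip_flanking_wildcards then PySem.Set.diff allowed ['N', '-', '.'] else allowed
  -- ''.join over the filtering generator = String.ofList of the filtered char list (exact)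
  String.ofList ((PySem.Str.upper iupac_sequence).toList.filter (fun c => PySem.Set.contains allowed c))

-- ===== PRECONDITION & SPEC =====
def Spec_nucleic_iupac_purify (iupac_sequence : String) (strip_flanking_wildcards : Bool) (out : String) : Prop := out = nucleic_iupac_purify_alt iupac_sequence strip_flanking_wildcards
instance (iupac_sequence : String) (strip_flanking_wildcards : Bool) (out : String) : Decidable (Spec_nucleic_iupac_purify iupac_sequence strip_flanking_wildcards out) := by unfold Spec_nucleic_iupac_purify; infer_instance

-- ===== CLAIM (what is proved, stated in full; the proofs are below) =====
def Claim_equal_nucleic_iupac_purify : Prop := ∀ (iupac_sequence : String) (strip_flanking_wildcards : Bool), Dom_nucleic_iupac_purify iupac_sequence strip_flanking_wildcards → Spec_nucleic_iupac_purify iupac_sequence strip_flanking_wildcards (nucleic_iupac_purify iupac_sequence strip_flanking_wildcards)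

-- ===== LEMMAS AND PROOFS =====

theorem replace_go_single (c : Char) (l acc : List Char) (fuel : Nat) (h : l.length ≤ fuel) :
    PySem.Chars.replace.go [c] [] fuel l acc = acc.reverse ++ l.filter (· ≠ c) := by
  induction l generalizing fuel acc with
  | nil => cases fuel <;> simp [PySem.Chars.replace.go]
  | cons hd t ih =>
    cases fuel with
    | zero => simp at h
    | succ n =>
      simp only [PySem.Chars.replace.go]
      by_cases hc : hd = c
      · subst hc
        have hp : [hd].isPrefixOf (hd :: t) = true := by simp [List.isPrefixOf]
        simp only [hp, if_pos, List.length_cons, List.length_nil, Nat.zero_add, List.drop_succ_cons,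
          List.drop_zero, List.reverse_nil, List.nil_append]
        rw [ih _ _ (by simpa using h)]
        simp
      · have hp : [c].isPrefixOf (hd :: t) = false := by
          simp [List.isPrefixOf]; exact fun e => hc e.symm
        rw [if_neg (by simp [hp])]
        rw [ih _ _ (by simpa using Nat.le_of_succ_le_succ h)]
        simp [hc]

theorem replace_single (cs : List Char) (c : Char) :
    PySem.Chars.replace cs [c] [] = cs.filter (· ≠ c) := by
  rw [PySem.Chars.replace]
  simp [replace_go_single c cs [] cs.length (le_refl _)]

theorem str_replace_single (s : String) (c : Char) :
    PySem.Str.replace s (String.ofList [c]) "" = String.ofList (s.toList.filter (· ≠ c)) := by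
  simp [PySem.Str.replace, replace_single]

-- the 18-character IUPAC list and its wildcard-free sublist
def iupacBig : List Char :=
  ['A', 'T', 'C', 'G', 'U', 'B', 'V', 'D', 'H', 'S', 'W', 'K', 'M', 'R', 'Y', 'N', '.', '-']
def iupacSmall : List Char :=
  ['A', 'T', 'C', 'G', 'U', 'B', 'V', 'D', 'H', 'S', 'W', 'K', 'M', 'R', 'Y']

theorem mem_big_iff (c : Char) :
    c ∈ iupacBig ↔ c ∈ iupacSmall ∨ c = 'N' ∨ c = '-' ∨ c = '.' := by
  simp only [iupacBig, iupacSmall, List.mem_cons, List.not_mem_nil, or_false]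
  tauto

theorem pt (c : Char) :
    (decide (c ≠ '.') && (decide (c ≠ '-') && (decide (c ≠ 'N') && decide (c ∈ iupacBig)))) =
      iupacSmall.contains c := by
  rw [List.contains_eq_mem]
  rcases Decidable.em (c ∈ iupacSmall) with hs | hs
  · fin_cases hs <;> decide
  · simp only [hs, decide_false]
    by_cases hb : c ∈ iupacBig
    · rcases (mem_big_iff c).mp hb with h | rfl | rfl | rfl
      · exact absurd h hs
      all_goals decide
    · simp [hb]

set_option maxHeartbeats 1000000 in
theorem nucleic_iupac_purify_spec : Claim_equal_nucleic_iupac_purify := by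
  intro s flag _
  unfold Spec_nucleic_iupac_purify nucleic_iupac_purify nucleic_iupac_purify_alt
  have hof : PySem.Set.ofList "ATCGUBVDHSWKMRYN.-".toList = iupacBig := by decide
  have hdiff : PySem.Set.diff iupacBig ['N', '-', '.'] = iupacSmall := by decide
  cases flag with
  | false =>
    simp only [if_neg (by decide : ¬ (false = true)), hof]
    rw [PySem.List.foldl_append_ite_eq_filter]
    simp only [List.nil_append]
    congr 1
    exact List.filter_congr fun c _ => by simp [PySem.Set.contains, iupacBig]
  | true =>
    simp only [hof, hdiff]
    rw [PySem.List.foldl_append_ite_eq_filter]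
    simp only [List.nil_append, List.foldl_cons, List.foldl_nil, str_replace_single]
    simp only [String.toList_ofList, List.filter_filter, if_true]
    congr 1
    refine List.filter_congr fun c _ => ?_
    have hc : PySem.Set.contains iupacSmall c = iupacSmall.contains c := by
      simp [PySem.Set.contains]
    rw [hc]
    exact pt c
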